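-- pv_equiv track=rewrite | github.com/aboucaud/adventofcode2017 | day09.py | parse_stream
-- ===== SOURCE A (Python) =====
-- def parse_stream(stream: str) -> int:
--     score = 0
--     group = 0
--     cancel = False
--     in_garbage = False
--
--     for v in stream:
--         if cancel:
--             cancel = False
--             continue
--         if v == '!':
--             cancel = True
--             continue
--         if v == '<':
--             in_garbage = True
--             continue
--         if in_garbage:
--             if v == '>':
--                 in_garbage = False
--             continue
--         if v == '{':
--             group += 1
--         if v == '}':
--             score += group
--             group -= 1
--
--     return score
-- ===== SOURCE B (Python) =====
-- def parse_stream(stream: str) -> int: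
--     # pass 1: drop each '!' together with the character that follows it
--     chars = []
--     i = 0
--     n = len(stream)
--     while i < n:
--         if stream[i] == '!':
--             i += 2
--         else:
--             chars.append(stream[i])
--             i += 1
--     # pass 2: drop garbage ('<' up to the matching '>', or to the end if unclosed)
--     kept = []
--     garbage = False
--     for c in chars:
--         if garbage:
--             if c == '>':
--                 garbage = False
--         elif c == '<':
--             garbage = True
--         else:
--             kept.append(c)
--     # pass 3: score the remaining braces by depth
--     score = 0
--     depth = 0
--     for c in kept:
--         if c == '{':
--             depth += 1
--         elif c == '}':
--             score += depth
--             depth -= 1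
--     return score
-- ===== Notes on version B (the rewrite author's own statement) =====
-- stated objective: alternative
-- what changed: Replaced the single four-state FSM pass by a three-pass pipeline: first strip each '!' plus its following char, then strip garbage sections (closed or trailing-unclosed), then a plain depth-counting scan over the cleaned characters.
import Mathlib
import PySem

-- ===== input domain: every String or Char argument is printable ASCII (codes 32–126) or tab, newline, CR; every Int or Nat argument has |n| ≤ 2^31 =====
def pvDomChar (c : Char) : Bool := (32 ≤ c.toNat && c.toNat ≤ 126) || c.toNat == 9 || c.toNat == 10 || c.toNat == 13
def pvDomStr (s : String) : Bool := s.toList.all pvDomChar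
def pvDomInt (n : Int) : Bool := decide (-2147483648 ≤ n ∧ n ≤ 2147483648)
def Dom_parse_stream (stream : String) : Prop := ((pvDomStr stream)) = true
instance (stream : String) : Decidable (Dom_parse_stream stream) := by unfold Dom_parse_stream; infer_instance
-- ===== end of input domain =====

-- B replaces A's one-pass four-state machine by a three-pass strip-then-count pipeline; objective: alternative (same cost).

-- ===== PORT A =====
-- one step of A's loop; state = (score, group, cancel, in_garbage)
def stepA (st : Int × Int × Bool × Bool) (v : Char) : Int × Int × Bool × Bool :=
  match st with
  | (score, group, cancel, ing) =>
    if cancel then (score, group, false, ing)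
    else if v = '!' then (score, group, true, ing)
    else if v = '<' then (score, group, false, true)
    else if ing then (if v = '>' then (score, group, false, false) else (score, group, false, true))
    else if v = '{' then (score, group + 1, false, false)
    else if v = '}' then (score + group, group - 1, false, false)
    else (score, group, false, false)

def parse_stream (stream : String) : Int :=
  (stream.toList.foldl stepA (0, 0, false, false)).1

-- ===== PORT B =====
-- pass 1: drop each '!' together with the character after it
def stripBang : List Char → List Char
  | [] => []
  | ['!'] => []
  | '!' :: _ :: rest2 => stripBang rest2
  | c :: rest => c :: stripBang rest

-- pass 2: drop garbage sections (closed, or unclosed to the end)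
def stripGarbage : Bool → List Char → List Char
  | _, [] => []
  | true, c :: rest => if c = '>' then stripGarbage false rest else stripGarbage true rest
  | false, c :: rest => if c = '<' then stripGarbage true rest else c :: stripGarbage false rest

-- pass 3: one step of the depth-scoring scan; state = (score, depth)
def stepC (p : Int × Int) (c : Char) : Int × Int :=
  if c = '{' then (p.1, p.2 + 1)
  else if c = '}' then (p.1 + p.2, p.2 - 1)
  else p

def parse_stream_alt (stream : String) : Int :=
  ((stripGarbage false (stripBang stream.toList)).foldl stepC (0, 0)).1

-- ===== PRECONDITION & SPEC =====
def Spec_parse_stream (stream : String) (out : Int) : Prop := out = parse_stream_alt stream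
instance (stream : String) (out : Int) : Decidable (Spec_parse_stream stream out) := by unfold Spec_parse_stream; infer_instance

-- ===== CLAIM (what is proved, stated in full; the proofs are below) =====
def Claim_equal_parse_stream : Prop := ∀ (stream : String), Dom_parse_stream stream → Spec_parse_stream stream (parse_stream stream)

-- ===== LEMMAS AND PROOFS =====
-- Invariant: running A's machine from (score, group, false, g) over l yields the same score
-- as the depth scan over the strip-pipeline output of l started in garbage state g.
theorem key : ∀ (n : Nat) (l : List Char), l.length ≤ n → ∀ (g : Bool) (score group : Int),
    (List.foldl stepA (score, group, false, g) l).1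
      = (List.foldl stepC (score, group) (stripGarbage g (stripBang l))).1 := by
  intro n
  induction n with
  | zero =>
    intro l hl
    match l with
    | [] => intro g score group; simp [stripBang, stripGarbage]
    | _ :: _ => simp at hl
  | succ n ih =>
    intro l hl g score group
    match l with
    | [] => simp [stripBang, stripGarbage]
    | c :: rest =>
      by_cases hc : c = '!'
      · subst hc
        match rest with
        | [] => simp [stepA, stripBang, stripGarbage]
        | c2 :: rest2 =>
          have h1 : List.foldl stepA (score, group, false, g) ('!' :: c2 :: rest2)
              = List.foldl stepA (score, group, false, g) rest2 := by
            simp [List.foldl, stepA]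
          have h2 : stripBang ('!' :: c2 :: rest2) = stripBang rest2 := by
            simp [stripBang]
          rw [h1, h2]
          exact ih rest2 (by simpa using Nat.le_of_succ_le_succ (Nat.le_of_succ_le hl)) g score group
      · have hrest : rest.length ≤ n := Nat.le_of_succ_le_succ (by simpa using hl)
        have hsb : stripBang (c :: rest) = c :: stripBang rest := by
          simp [stripBang, hc]
        cases g with
        | true =>
          by_cases hgt : c = '>'
          · subst hgt
            have h1 : List.foldl stepA (score, group, false, true) ('>' :: rest)
                = List.foldl stepA (score, group, false, false) rest := by
              simp [List.foldl, stepA]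
            rw [h1, hsb]
            simpa [stripGarbage] using ih rest hrest false score group
          · have h1 : List.foldl stepA (score, group, false, true) (c :: rest)
                = List.foldl stepA (score, group, false, true) rest := by
              by_cases h : c = '<'
              · subst h; simp [List.foldl, stepA]
              · simp [List.foldl, stepA, hc, hgt, h]
            rw [h1, hsb]
            simpa [stripGarbage, hgt] using ih rest hrest true score group
        | false =>
          by_cases hlt : c = '<'
          · subst hlt
            have h1 : List.foldl stepA (score, group, false, false) ('<' :: rest)
                = List.foldl stepA (score, group, false, true) rest := by
              simp [List.foldl, stepA]
            rw [h1, hsb]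
            simpa [stripGarbage] using ih rest hrest true score group
          · by_cases hob : c = '{'
            · subst hob
              have h1 : List.foldl stepA (score, group, false, false) ('{' :: rest)
                  = List.foldl stepA (score, group + 1, false, false) rest := by
                simp [List.foldl, stepA]
              rw [h1, hsb]
              simpa [stripGarbage, stepC] using ih rest hrest false score (group + 1)
            · by_cases hcb : c = '}'
              · subst hcb
                have h1 : List.foldl stepA (score, group, false, false) ('}' :: rest)
                    = List.foldl stepA (score + group, group - 1, false, false) rest := by
                  simp [List.foldl, stepA]
                rw [h1, hsb]
                simpa [stripGarbage, stepC] using ih rest hrest false (score + group) (group - 1)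
              · have h1 : List.foldl stepA (score, group, false, false) (c :: rest)
                    = List.foldl stepA (score, group, false, false) rest := by
                  simp [List.foldl, stepA, hc, hlt, hob, hcb]
                rw [h1, hsb]
                simpa [stripGarbage, hlt, stepC, hob, hcb] using ih rest hrest false score group

-- ===== VERDICT (by name: the statement is the Claim_ definition above) =====
theorem parse_stream_spec : Claim_equal_parse_stream := by
  intro stream _
  unfold Spec_parse_stream parse_stream parse_stream_alt
  exact key stream.toList.length stream.toList le_rfl false 0 0
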